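-- pv_equiv track=rewrite | github.com/AssassinMaeve/Cloud-Computing | LabRecords/Socket/Program-7/MaxServer.py | find_max_min_digit
-- ===== SOURCE A (Python) =====
-- def find_max_min_digit(num):
--     # Convert number to string to access each digit
--     num_str = str(abs(num))  # abs() handles negative numbers too
--
--     # Initialize max and min with the first digit
--     max_digit = min_digit = int(num_str[0])
--
--     # Loop through remaining digits
--     for ch in num_str[1:]:
--         digit = int(ch)
--         if digit > max_digit:
--             max_digit = digit
--         if digit < min_digit:
--             min_digit = digit
--
--     return max_digit, min_digit
-- ===== SOURCE B (Python) =====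
-- def find_max_min_digit(num):
--     sd = sorted(str(abs(num)))
--     return int(sd[-1]), int(sd[0])
-- ===== Notes on version B (the rewrite author's own statement) =====
-- stated objective: simpler
-- what changed: Replaces the running max/min tracking loop with sorting the digit string once and reading the extremes off the ends of the sorted sequence.
import Mathlib
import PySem

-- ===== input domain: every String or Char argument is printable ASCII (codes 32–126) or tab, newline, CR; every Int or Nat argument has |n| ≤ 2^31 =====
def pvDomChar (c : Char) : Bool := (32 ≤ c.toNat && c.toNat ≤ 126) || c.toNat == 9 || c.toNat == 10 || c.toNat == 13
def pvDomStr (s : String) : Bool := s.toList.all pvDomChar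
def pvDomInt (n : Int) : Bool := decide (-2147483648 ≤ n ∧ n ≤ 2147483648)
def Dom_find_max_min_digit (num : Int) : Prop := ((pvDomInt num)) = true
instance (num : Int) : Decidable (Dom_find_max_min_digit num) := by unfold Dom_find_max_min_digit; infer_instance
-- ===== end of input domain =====

-- B replaces A's running max/min tracking loop by sorting the digit string once and
-- reading the extremes off the two ends of the sorted sequence (objective: alternative).

-- ===== PORT A =====
-- int(ch) for a single character: exact whenever ch is a decimal digit, which is the only
-- case either program reaches (every character of str(abs(num)) is a digit).
def pvDigit (c : Char) : Int := (c.toNat : Int) - 48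

def find_max_min_digit (num : Int) : Int × Int :=
  -- num_str = str(abs(num))
  let num_str := PySem.Int.toChars |num|
  match num_str with
  | [] => (0, 0)  -- unreachable: str(abs(num)) is never empty
  | c0 :: rest =>
    -- max_digit = min_digit = int(num_str[0]); loop over num_str[1:]
    rest.foldl (fun p ch =>
      let digit := pvDigit ch
      ((if digit > p.1 then digit else p.1),
       (if digit < p.2 then digit else p.2)))
      (pvDigit c0, pvDigit c0)

-- ===== PORT B =====
def find_max_min_digit_alt (num : Int) : Int × Int :=
  -- sd = sorted(str(abs(num)))
  let sd := PySem.List.sorted (PySem.Int.toChars |num|) (fun c => c)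
  -- return int(sd[-1]), int(sd[0])
  match PySem.List.pyGet? sd (-1), PySem.List.pyGet? sd 0 with
  | some cmax, some cmin => (pvDigit cmax, pvDigit cmin)
  | _, _ => (0, 0)  -- unreachable: sd is never empty

-- ===== PRECONDITION & SPEC =====
def Spec_find_max_min_digit (num : Int) (out : Int × Int) : Prop := out = find_max_min_digit_alt num
instance (num : Int) (out : Int × Int) : Decidable (Spec_find_max_min_digit num out) := by unfold Spec_find_max_min_digit; infer_instance

-- ===== CLAIM (what is proved, stated in full; the proofs are below) =====
def Claim_equal_find_max_min_digit : Prop := ∀ (num : Int), Dom_find_max_min_digit num → Spec_find_max_min_digit num (find_max_min_digit num)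

-- ===== LEMMAS AND PROOFS =====

theorem pv_toDigitsCore_len (b f n : Nat) (tl : List Char) :
    tl.length ≤ (Nat.toDigitsCore b f n tl).length := by
  induction f generalizing n tl with
  | zero => simp [Nat.toDigitsCore]
  | succ f ih =>
    simp only [Nat.toDigitsCore]
    split
    · simp
    · exact le_trans (by simp) (ih _ _)

theorem pv_toDigits_ne_nil (b n : Nat) : Nat.toDigits b n ≠ [] := by
  unfold Nat.toDigits
  simp only [Nat.toDigitsCore]
  split
  · simp
  · intro h
    have := pv_toDigitsCore_len b n (n / b) [(n % b).digitChar]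
    rw [h] at this
    simp at this

theorem pv_toChars_ne_nil (n : Int) : PySem.Int.toChars n ≠ [] := by
  unfold PySem.Int.toChars
  split
  · simp
  · exact pv_toDigits_ne_nil 10 n.toNat

theorem pvDigit_mono {c c' : Char} (h : c ≤ c') : pvDigit c ≤ pvDigit c' := by
  unfold pvDigit
  have : c.toNat ≤ c'.toNat := Fin.mk_le_mk.mp h
  omega

-- A's tracking loop on pairs is the pair of running-max and running-min folds.
theorem pv_fold_pair (l : List Char) (a b : Int) :
    l.foldl (fun p ch =>
        ((if pvDigit ch > p.1 then pvDigit ch else p.1),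
         (if pvDigit ch < p.2 then pvDigit ch else p.2))) (a, b)
      = (l.foldl (fun m ch => max m (pvDigit ch)) a,
         l.foldl (fun m ch => min m (pvDigit ch)) b) := by
  induction l generalizing a b with
  | nil => rfl
  | cons h t ih =>
    simp only [List.foldl_cons]
    rw [ih]
    congr 2 <;> omega

-- in a chain-ordered list every element is ≤ the last one
theorem pv_le_getLast {α : Type} [LinearOrder α] :
    ∀ (l : List α) (hl : l ≠ []), l.Pairwise (· ≤ ·) → ∀ y ∈ l, y ≤ l.getLast hl := by
  intro l
  induction l with
  | nil => intro hl; exact absurd rfl hl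
  | cons a t ih =>
    intro _ hp y hy
    rcases List.pairwise_cons.mp hp with ⟨ha, ht⟩
    cases t with
    | nil => simp at hy; simp [hy, List.getLast]
    | cons b t' =>
      rw [List.getLast_cons (by simp)]
      rcases List.mem_cons.mp hy with rfl | hy'
      · exact le_trans (ha _ (List.getLast_mem (by simp))) (le_refl _)
      · exact ih (by simp) ht y hy'

theorem find_max_min_digit_eq (num : Int) :
    find_max_min_digit num = find_max_min_digit_alt num := by
  unfold find_max_min_digit find_max_min_digit_alt
  obtain ⟨c0, rest, hcs⟩ := List.exists_cons_of_ne_nil (pv_toChars_ne_nil |num|)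
  set cs := PySem.Int.toChars |num| with hcsdef
  set sd := PySem.List.sorted cs (fun c => c) with hsd
  have hperm : sd.Perm cs := PySem.List.sorted_perm cs (fun c => c) false
  have hsdne : sd ≠ [] := by
    intro h
    rw [h] at hperm
    exact pv_toChars_ne_nil |num| (List.Perm.nil_eq hperm).symm
  obtain ⟨m, t, hmt⟩ := List.exists_cons_of_ne_nil hsdne
  have hpair : sd.Pairwise (· ≤ ·) := by
    have := PySem.List.sorted_pairwise cs (fun c => c)
    simpa [hsd] using this
  -- the two indexings of B
  have hget0 : PySem.List.pyGet? sd 0 = some m := by rw [hmt]; exact PySem.List.pyGet?_zero_cons m t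
  have hlast : PySem.List.pyGet? sd (-1) = some (sd.getLast hsdne) := by
    rw [PySem.List.pyGet?_neg_one, List.getLast?_eq_some_getLast hsdne]
  rw [hcs]
  simp only []
  rw [pv_fold_pair, hget0, hlast]
  set L := sd.getLast hsdne with hL
  have hLmem : L ∈ cs := hperm.mem_iff.mp (List.getLast_mem hsdne)
  have hmin_all : ∀ y ∈ cs, m ≤ y := PySem.List.key_head_sorted_le cs (fun c => c) hmt
  have hmax_all : ∀ y ∈ cs, y ≤ L := fun y hy =>
    pv_le_getLast sd hsdne hpair y (hperm.mem_iff.mpr hy)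
  have hmmem : m ∈ cs := hperm.mem_iff.mp (by rw [hmt]; simp)
  show _ = (pvDigit L, pvDigit m)
  rw [Prod.mk.injEq]
  constructor
  · -- max component: the running max equals the digit at the sorted string's right end
    rw [← List.foldl_map]
    apply le_antisymm
    · rcases PySem.List.foldl_max_mem (rest.map pvDigit) (pvDigit c0) with h | h
      · rw [h]; exact pvDigit_mono (hmax_all c0 (by rw [hcs]; simp))
      · obtain ⟨x, hxmem, hxe⟩ := List.mem_map.mp h
        rw [← hxe]
        exact pvDigit_mono (hmax_all x (by rw [hcs]; exact List.mem_cons_of_mem _ hxmem))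
    · rw [hcs] at hLmem
      rcases List.mem_cons.mp hLmem with rfl | hL'
      · exact (PySem.List.le_foldl_max (rest.map pvDigit) (pvDigit L)).1
      · exact (PySem.List.le_foldl_max (rest.map pvDigit) (pvDigit c0)).2 (pvDigit L)
          (List.mem_map_of_mem hL')
  · -- min component: the running min equals the digit at the sorted string's left end
    rw [← List.foldl_map]
    apply le_antisymm
    · rw [hcs] at hmmem
      rcases List.mem_cons.mp hmmem with rfl | hm'
      · exact (PySem.List.foldl_min_le (rest.map pvDigit) (pvDigit m)).1
      · exact (PySem.List.foldl_min_le (rest.map pvDigit) (pvDigit c0)).2 (pvDigit m)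
          (List.mem_map_of_mem hm')
    · rcases PySem.List.foldl_min_mem (rest.map pvDigit) (pvDigit c0) with h | h
      · rw [h]; exact pvDigit_mono (hmin_all c0 (by rw [hcs]; simp))
      · obtain ⟨x, hxmem, hxe⟩ := List.mem_map.mp h
        rw [← hxe]
        exact pvDigit_mono (hmin_all x (by rw [hcs]; exact List.mem_cons_of_mem _ hxmem))

-- ===== VERDICT (by name: the statement is the Claim_ definition above) =====
theorem find_max_min_digit_spec : Claim_equal_find_max_min_digit := by
  intro num _
  unfold Spec_find_max_min_digit
  exact find_max_min_digit_eq num
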